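-- pv_equiv track=rewrite | github.com/yaeba/binary-search-solutions | solutions/Factorial-Sum.py | solve
-- ===== SOURCE A (Python) =====
-- def solve(n):
--     factorials = [1] * 12
--     for i in range(1, 12):
--         factorials[i] = factorials[i - 1] * (i + 1)
--
--     for x in factorials[::-1]:
--         if n >= x:
--             n -= x
--
--     return n == 0
-- ===== SOURCE B (Python) =====
-- def solve(n):
--     digits = []
--     for i in range(2, 14):
--         n, r = divmod(n, i)
--         digits.append(r)
--     return n == 0 and all(r <= 1 for r in digits)
-- ===== Notes on version B (the rewrite author's own statement) =====
-- stated objective: alternative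
-- what changed: Replaces the explicit factorial table and greedy descending-subtraction loop with factorial-number-system digit extraction: twelve divmods by increasing divisors, accepting iff no digit exceeds one and the final quotient vanishes.
import Mathlib
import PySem

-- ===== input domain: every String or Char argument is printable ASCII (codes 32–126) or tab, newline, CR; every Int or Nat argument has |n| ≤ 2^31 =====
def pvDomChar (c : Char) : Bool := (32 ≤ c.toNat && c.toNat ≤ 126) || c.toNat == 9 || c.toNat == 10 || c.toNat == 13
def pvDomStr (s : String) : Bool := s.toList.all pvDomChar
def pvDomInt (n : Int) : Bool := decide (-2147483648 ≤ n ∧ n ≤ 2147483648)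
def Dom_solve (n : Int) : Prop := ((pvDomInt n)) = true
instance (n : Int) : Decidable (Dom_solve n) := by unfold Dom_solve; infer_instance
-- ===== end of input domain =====

-- B replaces A's explicit 1!..12! table and greedy descending subtraction by factorial-number-system
-- digit extraction (12 divmods); same return value, different algorithm (objective: alternative/idiomatic).

-- ===== PORT A =====
def solve (n : Int) : Bool :=
  let factorials : List Int := List.replicate 12 1
  let factorials := (PySem.List.pyRange 1 12 1).foldl
    (fun f i => f.set i.toNat (PySem.List.pyGetD f (i - 1) 0 * (i + 1))) factorials
  let n := ((PySem.List.slice? factorials none none (-1)).getD []).foldl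
    (fun n x => if n ≥ x then n - x else n) n
  n == 0

-- ===== PORT B =====
def solve_alt (n : Int) : Bool :=
  let s := (PySem.List.pyRange 2 14 1).foldl
    (fun (p : Int × List Int) i => (PySem.Int.floordiv p.1 i, p.2 ++ [PySem.Int.mod p.1 i]))
    (n, [])
  s.1 == 0 && s.2.all (fun r => decide (r ≤ 1))

-- ===== PRECONDITION & SPEC =====
def Spec_solve (n : Int) (out : Bool) : Prop := out = solve_alt n
instance (n : Int) (out : Bool) : Decidable (Spec_solve n out) := by unfold Spec_solve; infer_instance

-- ===== CLAIM (what is proved, stated in full; the proofs are below) =====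
def Claim_equal_solve : Prop := ∀ (n : Int), Dom_solve n → Spec_solve n (solve n)

-- ===== LEMMAS AND PROOFS =====

-- [2, 3, ..., k+1] : the factorial-base divisors up to level k
def divList : Nat → List Int
  | 0 => []
  | k + 1 => divList k ++ [(k : Int) + 2]

-- k! as an Int
def ifact : Nat → Int
  | 0 => 1
  | k + 1 => ifact k * ((k : Int) + 1)

-- [k!, (k-1)!, ..., 1!] : A's factorial table reversed
def descList : Nat → List Int
  | 0 => []
  | k + 1 => ifact (k + 1) :: descList k

-- A's greedy subtraction loop
def gfold (l : List Int) (n : Int) : Int :=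
  l.foldl (fun n x => if n ≥ x then n - x else n) n

-- B's digit check, as structural recursion over the divisor list
def chk : List Int → Int → Bool
  | [], m => m == 0
  | i :: t, m => (decide (m % i ≤ 1)) && chk t (m / i)

-- "m is a 0/1 combination of the mixed-radix weights of divisor list l"
def RepW : List Int → Int → Prop
  | [], m => m = 0
  | i :: t, m => ∃ r q : Int, (r = 0 ∨ r = 1) ∧ m = q * i + r ∧ RepW t q

theorem chk_iff_RepW (l : List Int) (hl : ∀ i ∈ l, 2 ≤ i) (m : Int) :
    chk l m = true ↔ RepW l m := by
  induction l generalizing m with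
  | nil => simp [chk, RepW]
  | cons i t ih =>
    have hi : 2 ≤ i := hl i (List.mem_cons_self ..)
    have ht : ∀ j ∈ t, 2 ≤ j := fun j hj => hl j (List.mem_cons_of_mem _ hj)
    simp only [chk, RepW, Bool.and_eq_true, decide_eq_true_eq, ih ht]
    constructor
    · rintro ⟨h1, h2⟩
      refine ⟨m % i, m / i, ?_, ?_, h2⟩
      · have := Int.emod_nonneg m (by omega : i ≠ 0); omega
      · exact (Int.ediv_mul_add_emod m i).symm
    · rintro ⟨r, q, hr, hm, hq⟩
      have her : m % i = r := by
        subst hm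
        rw [mul_comm, Int.mul_add_emod_self_left]
        exact Int.emod_eq_of_lt (by omega) (by omega)
      have heq : m / i = q := by
        subst hm
        rw [add_comm, Int.add_mul_ediv_right _ _ (by omega : i ≠ 0),
          Int.ediv_eq_zero_of_lt (by omega) (by omega)]
        ring
      rw [her, heq]; exact ⟨by omega, hq⟩

theorem divList_pos : ∀ k, ∀ i ∈ divList k, 2 ≤ i := by
  intro k
  induction k with
  | zero => simp [divList]
  | succ k ih =>
    intro i hi
    simp only [divList, List.mem_append, List.mem_singleton] at hi
    rcases hi with h | h
    · exact ih i h
    · omega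

theorem prod_divList (k : Nat) : (divList k).prod = ifact (k + 1) := by
  induction k with
  | zero => simp [divList, ifact]
  | succ k ih =>
    simp only [divList, List.prod_append, List.prod_cons, List.prod_nil, ih, ifact]
    push_cast; ring

theorem RepW_bound (l : List Int) (hl : ∀ i ∈ l, 2 ≤ i) (m : Int) (h : RepW l m) :
    0 ≤ m ∧ m < l.prod := by
  induction l generalizing m with
  | nil => simp only [RepW] at h; simp [h]
  | cons i t ih =>
    obtain ⟨r, q, hr, hm, hq⟩ := h
    have hi : 2 ≤ i := hl i (List.mem_cons_self ..)
    have ht : ∀ j ∈ t, 2 ≤ j := fun j hj => hl j (List.mem_cons_of_mem _ hj)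
    have hb := ih ht q hq
    have h1 : q * i ≤ (t.prod - 1) * i :=
      mul_le_mul_of_nonneg_right (by omega) (by omega)
    have h0 : 0 ≤ q * i := mul_nonneg (by omega) (by omega)
    have hr' : 0 ≤ r ∧ r ≤ 1 := by rcases hr with rfl | rfl <;> norm_num
    simp only [List.prod_cons]
    constructor
    · linarith [hr'.1]
    · linarith [h1, hr'.2, hi]

theorem RepW_snoc (l : List Int) (j m : Int) :
    RepW (l ++ [j]) m ↔ ∃ e : Int, (e = 0 ∨ e = 1) ∧ RepW l (m - e * l.prod) := by
  induction l generalizing m with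
  | nil =>
    simp only [List.nil_append, RepW, List.prod_nil]
    constructor
    · rintro ⟨r, q, hr, hm, hq⟩
      subst hq
      have hm' : m = r := by simpa using hm
      exact ⟨r, hr, by omega⟩
    · rintro ⟨e, he, hq⟩
      refine ⟨e, 0, he, ?_, rfl⟩
      simp only [zero_mul, zero_add]
      omega
  | cons i t ih =>
    simp only [List.cons_append, RepW, List.prod_cons, ih]
    constructor
    · rintro ⟨r, q, hr, hm, e, he, hq⟩
      exact ⟨e, he, r, q - e * t.prod, hr, by ring_nf; ring_nf at hm ⊢; omega, hq⟩
    · rintro ⟨e, he, r, q, hr, hm, hq⟩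
      refine ⟨r, q + e * t.prod, hr, by ring_nf; ring_nf at hm ⊢; omega, e, he, ?_⟩
      simpa using hq

theorem gfold_descList_iff (k : Nat) : ∀ m, (gfold (descList k) m = 0 ↔ RepW (divList k) m) := by
  induction k with
  | zero => intro m; simp [gfold, descList, divList, RepW]
  | succ k ih =>
    intro m
    have hstep : gfold (descList (k+1)) m
        = gfold (descList k) (if m ≥ ifact (k+1) then m - ifact (k+1) else m) := rfl
    rw [hstep, ih]
    rw [show divList (k+1) = divList k ++ [(k:Int)+2] from rfl, RepW_snoc, prod_divList]
    have hpos := divList_pos k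
    by_cases hm : m ≥ ifact (k+1)
    · rw [if_pos hm]
      constructor
      · intro h; exact ⟨1, Or.inr rfl, by simpa using h⟩
      · rintro ⟨e, he, hq⟩
        rcases he with rfl | rfl
        · exfalso
          have hb := RepW_bound _ hpos _ (by simpa using hq)
          rw [prod_divList] at hb
          omega
        · simpa using hq
    · rw [if_neg hm]
      constructor
      · intro h; exact ⟨0, Or.inl rfl, by simpa using h⟩
      · rintro ⟨e, he, hq⟩
        rcases he with rfl | rfl
        · simpa using hq
        · exfalso
          have hb := RepW_bound _ hpos _ hq
          omega

theorem solve_eq_gfold (n : Int) : solve n = decide (gfold (descList 12) n = 0) := by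
  have hf : ((PySem.List.pyRange 1 12 1).foldl
      (fun f i => f.set i.toNat (PySem.List.pyGetD f (i - 1) 0 * (i + 1)))
      (List.replicate 12 1) : List Int)
    = [1,2,6,24,120,720,5040,40320,362880,3628800,39916800,479001600] := by decide
  have hrev : ([1,2,6,24,120,720,5040,40320,362880,3628800,39916800,479001600] : List Int).reverse
    = [479001600,39916800,3628800,362880,40320,5040,720,120,24,6,2,1] := by decide
  have hd : descList 12 = [479001600,39916800,3628800,362880,40320,5040,720,120,24,6,2,1] := by decide
  simp only [solve, hf, PySem.List.slice?_none_none_neg_one, Option.getD_some, hrev, gfold, hd]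
  rw [Bool.eq_iff_iff]
  simp only [beq_iff_eq, decide_eq_true_eq]

theorem solve_alt_eq_chk (n : Int) : solve_alt n = chk (divList 12) n := by
  have hr : (PySem.List.pyRange 2 14 1) = [2,3,4,5,6,7,8,9,10,11,12,13] := by decide
  have hd : divList 12 = [2,3,4,5,6,7,8,9,10,11,12,13] := by decide
  simp only [solve_alt, hr, hd, chk, List.foldl_cons, List.foldl_nil, List.all_cons, List.all_nil,
    List.nil_append, List.cons_append,
    PySem.Int.floordiv_eq_ediv_of_pos (by norm_num : (0:Int) < 2), PySem.Int.mod_eq_emod_of_pos (by norm_num : (0:Int) < 2),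
    PySem.Int.floordiv_eq_ediv_of_pos (by norm_num : (0:Int) < 3), PySem.Int.mod_eq_emod_of_pos (by norm_num : (0:Int) < 3),
    PySem.Int.floordiv_eq_ediv_of_pos (by norm_num : (0:Int) < 4), PySem.Int.mod_eq_emod_of_pos (by norm_num : (0:Int) < 4),
    PySem.Int.floordiv_eq_ediv_of_pos (by norm_num : (0:Int) < 5), PySem.Int.mod_eq_emod_of_pos (by norm_num : (0:Int) < 5),
    PySem.Int.floordiv_eq_ediv_of_pos (by norm_num : (0:Int) < 6), PySem.Int.mod_eq_emod_of_pos (by norm_num : (0:Int) < 6),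
    PySem.Int.floordiv_eq_ediv_of_pos (by norm_num : (0:Int) < 7), PySem.Int.mod_eq_emod_of_pos (by norm_num : (0:Int) < 7),
    PySem.Int.floordiv_eq_ediv_of_pos (by norm_num : (0:Int) < 8), PySem.Int.mod_eq_emod_of_pos (by norm_num : (0:Int) < 8),
    PySem.Int.floordiv_eq_ediv_of_pos (by norm_num : (0:Int) < 9), PySem.Int.mod_eq_emod_of_pos (by norm_num : (0:Int) < 9),
    PySem.Int.floordiv_eq_ediv_of_pos (by norm_num : (0:Int) < 10), PySem.Int.mod_eq_emod_of_pos (by norm_num : (0:Int) < 10),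
    PySem.Int.floordiv_eq_ediv_of_pos (by norm_num : (0:Int) < 11), PySem.Int.mod_eq_emod_of_pos (by norm_num : (0:Int) < 11),
    PySem.Int.floordiv_eq_ediv_of_pos (by norm_num : (0:Int) < 12), PySem.Int.mod_eq_emod_of_pos (by norm_num : (0:Int) < 12),
    PySem.Int.floordiv_eq_ediv_of_pos (by norm_num : (0:Int) < 13), PySem.Int.mod_eq_emod_of_pos (by norm_num : (0:Int) < 13)]
  rw [Bool.eq_iff_iff]
  simp only [Bool.and_eq_true, Bool.and_true, decide_eq_true_eq, beq_iff_eq]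
  tauto

theorem pv_final (n : Int) : solve n = solve_alt n := by
  rw [solve_eq_gfold, solve_alt_eq_chk, Bool.eq_iff_iff]
  simp only [decide_eq_true_eq]
  rw [chk_iff_RepW _ (divList_pos 12)]
  exact gfold_descList_iff 12 n

-- ===== VERDICT (by name: the statement is the Claim_ definition above) =====
theorem solve_spec : Claim_equal_solve := by
  intro n _
  unfold Spec_solve
  exact pv_final n
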